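-- pv_equiv track=rewrite | github.com/tamara-git/Algo1 | Guía10/filtrar_codigos_primos.py | filtrar_codigos_primos
-- ===== SOURCE A (Python) =====
-- def devolver_ultimos_3digitos(numero: int) -> int:
--     ultimos_3digitos: str = ""
--     ultimos_digitos: str = ""
--
--     digitos: str = str(numero)
--     if len(digitos) > 3:
--         for caracter in range(len(digitos)-3, len(digitos)):
--             ultimos_3digitos += digitos[caracter]
--         return int(ultimos_3digitos)
--     else:
--         for caracter in range(len(digitos)):
--             ultimos_3digitos += digitos[caracter]
--         return int(ultimos_3digitos)
--
-- def es_primo_ultimos_3digitos(numero: int) -> bool: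
--     variable: int = 1
--     divisor: int = 0
--     while variable <= numero:
--         if numero % variable == 0:
--             divisor += 1
--             variable += 1
--         else:
--             variable += 1
--
--     if divisor == 2:
--         return True
--     return False
--
-- def filtrar_codigos_primos(codigos_barra:(list[int])) -> list[int]:
--     lista_codigos_primos_aux: list[int] = []
--     lista_codigos_primos: list[int] = []
--     for numero in codigos_barra:
--         if es_primo_ultimos_3digitos(devolver_ultimos_3digitos(numero)):
--             lista_codigos_primos_aux.append(devolver_ultimos_3digitos(numero))
--
--     for numero_primo in lista_codigos_primos_aux:
--         if numero_primo not in lista_codigos_primos: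
--             lista_codigos_primos.append(numero_primo)
--
--     return lista_codigos_primos
-- ===== SOURCE B (Python) =====
-- def filtrar_codigos_primos(codigos_barra: list[int]) -> list[int]:
--     resultado: list[int] = []
--     vistos: set[int] = set()
--     for numero in codigos_barra:
--         u = int(str(numero)[-3:])
--         if _es_primo(u) and u not in vistos:
--             vistos.add(u)
--             resultado.append(u)
--     return resultado
--
-- def _es_primo(n: int) -> bool:
--     if n < 2:
--         return False
--     d = 2
--     while d * d <= n:
--         if n % d == 0:
--             return False
--         d += 1
--     return True
-- ===== Notes on version B (the rewrite author's own statement) =====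
-- stated objective: faster
-- what changed: B replaces A's divisor-counting primality loop (all v in 1..n) with early-exit trial division up to sqrt(n), the per-character index loop for the last three digits with a single str(n)[-3:] slice, and A's two passes (collect, then quadratic list-membership dedup) with one pass over the codes using a seen-set.
import Mathlib
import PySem

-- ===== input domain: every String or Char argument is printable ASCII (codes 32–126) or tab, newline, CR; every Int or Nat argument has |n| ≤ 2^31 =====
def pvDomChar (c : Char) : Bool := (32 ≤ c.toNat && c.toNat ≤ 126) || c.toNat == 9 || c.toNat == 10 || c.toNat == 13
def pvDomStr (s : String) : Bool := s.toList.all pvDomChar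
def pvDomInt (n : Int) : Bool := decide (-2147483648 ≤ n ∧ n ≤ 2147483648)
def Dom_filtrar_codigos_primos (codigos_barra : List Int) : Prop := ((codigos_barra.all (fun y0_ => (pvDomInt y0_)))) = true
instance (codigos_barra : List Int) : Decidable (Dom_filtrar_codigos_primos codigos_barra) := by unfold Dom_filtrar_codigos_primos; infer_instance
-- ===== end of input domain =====

-- B makes one pass with a seen-set, tests primality by trial division up to √n and takes the
-- last three digits by a single [-3:] slice, instead of A's divisor counting up to n, per-character
-- index loop and separate dedup pass; the return values are proved equal on all inputs.

-- ===== PORT A =====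
def pvDevolver (numero : Int) : Int :=
  let digitos : List Char := PySem.Int.toChars numero
  if PySem.List.len digitos > 3 then
    let u := (PySem.List.pyRange (PySem.List.len digitos - 3) (PySem.List.len digitos) 1).foldl
               (fun acc i => acc ++ [PySem.List.pyGetD digitos i ' ']) ([] : List Char)
    (PySem.Int.ofChars? u).getD 0
  else
    let u := (PySem.List.pyRange 0 (PySem.List.len digitos) 1).foldl
               (fun acc i => acc ++ [PySem.List.pyGetD digitos i ' ']) ([] : List Char)
    (PySem.Int.ofChars? u).getD 0

def pvEsPrimo (numero : Int) : Bool :=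
  let divisor : Int := (PySem.List.pyRange 1 (numero + 1) 1).foldl
      (fun div v => if PySem.Int.mod numero v == 0 then div + 1 else div) 0
  divisor == 2

def filtrar_codigos_primos (codigos_barra : List Int) : List Int :=
  let aux := codigos_barra.foldl (fun acc numero =>
      if pvEsPrimo (pvDevolver numero) then acc ++ [pvDevolver numero] else acc) []
  aux.foldl (fun lista p => if lista.contains p then lista else lista ++ [p]) []

-- ===== PORT B =====
def pvUltimos3 (n : Int) : Int :=
  (PySem.Int.ofChars? (PySem.List.slice (PySem.Int.toChars n) (some (-3)) none)).getD 0

def pvTrial (n d : Int) : Bool :=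
  if d * d ≤ n then (if PySem.Int.mod n d == 0 then false else pvTrial n (d + 1)) else true
termination_by (n + 1 - d).toNat
decreasing_by
  have hd : d ≤ n := by
    by_cases h0 : d ≤ 0
    · nlinarith
    · nlinarith
  omega

def pvEsPrimoAlt (n : Int) : Bool := if n < 2 then false else pvTrial n 2

def filtrar_codigos_primos_alt (codigos_barra : List Int) : List Int :=
  (codigos_barra.foldl (fun (st : List Int × PySem.Set Int) numero =>
      let u := pvUltimos3 numero
      if pvEsPrimoAlt u && !(PySem.Set.contains st.2 u) then (st.1 ++ [u], PySem.Set.add st.2 u)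
      else st)
    ([], PySem.Set.empty)).1
-- ===== PRECONDITION & SPEC =====
def Spec_filtrar_codigos_primos (codigos_barra : List Int) (out : List Int) : Prop := out = filtrar_codigos_primos_alt codigos_barra
instance (codigos_barra : List Int) (out : List Int) : Decidable (Spec_filtrar_codigos_primos codigos_barra out) := by unfold Spec_filtrar_codigos_primos; infer_instance

-- ===== CLAIM (what is proved, stated in full; the proofs are below) =====
def Claim_equal_filtrar_codigos_primos : Prop := ∀ (codigos_barra : List Int), Dom_filtrar_codigos_primos codigos_barra → Spec_filtrar_codigos_primos codigos_barra (filtrar_codigos_primos codigos_barra)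

-- ===== LEMMAS AND PROOFS =====
theorem dev_eq (n : Int) : pvDevolver n = pvUltimos3 n := by
  unfold pvDevolver pvUltimos3
  set s : List Char := PySem.Int.toChars n with hs
  have hlen : PySem.List.len s = (s.length : Int) := PySem.List.len_eq s
  by_cases h : PySem.List.len s > 3
  · rw [if_pos h]
    have h3 : (3:Nat) ≤ s.length := by rw [hlen] at h; exact_mod_cast h.le
    rw [PySem.List.foldl_append_singleton_eq_map, hlen,
        PySem.List.map_pyGetD_pyRange' s ' ' (a := (s.length:Int) - 3) (by omega),
        PySem.List.slice_from_neg_ofNat s 3 (by omega), List.nil_append]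
    have e : ((s.length:Int) - 3).toNat = s.length - 3 := by omega
    simp only [e]
  · rw [if_neg h]
    have h3 : s.length ≤ 3 := by rw [hlen] at h; omega
    rw [PySem.List.foldl_append_singleton_eq_map, hlen,
        PySem.List.slice_from_neg_ofNat s 3 (by omega),
        PySem.List.map_pyGetD_pyRange' s ' ' (a := (0:Int)) (le_refl 0), List.nil_append]
    have h0 : s.length - 3 = 0 := by omega
    rw [h0, List.drop_zero, Int.toNat_zero, List.drop_zero]
theorem trial_iff (n : Int) (d : Int) (hd : 2 ≤ d) :
    (pvTrial n d = true ↔ ∀ e : Int, d ≤ e → e * e ≤ n → PySem.Int.mod n e ≠ 0) := by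
  generalize hk : (n + 1 - d).toNat = k
  induction k using Nat.strong_induction_on generalizing d with
  | _ k ih =>
  rw [pvTrial]
  by_cases h : d * d ≤ n
  · rw [if_pos h]
    have hdn : d ≤ n := by nlinarith
    by_cases hm : PySem.Int.mod n d = 0
    · have hb : (PySem.Int.mod n d == 0) = true := by simpa using hm
      rw [hb, if_pos rfl]
      simp only [Bool.false_eq_true, false_iff]
      push Not
      exact ⟨d, le_refl d, h, hm⟩
    · have hb : (PySem.Int.mod n d == 0) = false := by simpa using hm
      rw [hb]
      simp only [Bool.false_eq_true, if_false]
      rw [ih (n + 1 - (d + 1)).toNat (by omega) (d + 1) (by omega) rfl]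
      constructor
      · intro H e hde hee
        rcases eq_or_lt_of_le hde with rfl | hlt
        · exact hm
        · exact H e (by omega) hee
      · intro H e hde hee
        exact H e (by omega) hee
  · rw [if_neg h]
    simp only [true_iff]
    intro e hde hee
    exfalso
    nlinarith
theorem countP_divisors (m : Nat) : (List.range' 1 m).countP (fun d => decide (d ∣ m)) = m.divisors.card := by
  rw [Nat.divisors, Nat.Ico_eq_range']
  simp only [Nat.add_sub_cancel]
  rw [Finset.card_def, Finset.filter_val, Multiset.filter_coe, Multiset.coe_card]
  simp [List.countP_eq_length_filter]

theorem card_divisors_two (m : Nat) (hm : 2 ≤ m) : m.divisors.card = 2 ↔ m.Prime := by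
  constructor
  · intro h
    by_contra hp
    obtain ⟨d, hdvd, hd2, hdm⟩ := Nat.exists_dvd_of_not_prime2 hm hp
    have hsub : ({1, d, m} : Finset ℕ) ⊆ m.divisors := by
      intro x hx
      simp only [Finset.mem_insert, Finset.mem_singleton] at hx
      rcases hx with rfl | rfl | rfl
      · exact Nat.one_mem_divisors.mpr (by omega)
      · exact Nat.mem_divisors.mpr ⟨hdvd, by omega⟩
      · exact Nat.mem_divisors_self _ (by omega)
    have hcard : ({1, d, m} : Finset ℕ).card = 3 := by
      rw [Finset.card_insert_of_notMem (by simp; omega),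
          Finset.card_insert_of_notMem (by simp; omega), Finset.card_singleton]
    have := Finset.card_le_card hsub
    omega
  · intro hp
    rw [hp.divisors, Finset.card_insert_of_notMem (by simp; omega), Finset.card_singleton]

theorem primo_eq (n : Int) : pvEsPrimo n = pvEsPrimoAlt n := by
  by_cases hn2 : n < 2
  · unfold pvEsPrimo pvEsPrimoAlt
    rw [if_pos hn2]
    by_cases hn0 : n ≤ 0
    · rw [PySem.List.pyRange_one_eq_nil (by omega)]
      simp
    · have h1 : n = 1 := by omega
      subst h1
      decide
  · unfold pvEsPrimo pvEsPrimoAlt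
    rw [if_neg hn2]
    push Not at hn2
    set m : Nat := n.toNat with hm
    have hnm : n = (m : Int) := by omega
    have hm2 : 2 ≤ m := by omega
    rw [PySem.List.foldl_if_add_one (fun v => PySem.Int.mod n v == 0)]
    have hcount : (PySem.List.pyRange 1 (n + 1)).countP (fun v => PySem.Int.mod n v == 0)
        = (List.range' 1 m).countP (fun d => decide (d ∣ m)) := by
      rw [PySem.List.pyRange_one, List.countP_map, List.range'_eq_map_range, List.countP_map]
      have e2 : (n + 1 - 1).toNat = m := by omega
      rw [e2]
      apply List.countP_congr
      intro k _
      simp only [Function.comp]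
      have e1 : (1 : Int) + (k : Nat) = ((1 + k : Nat) : Int) := by push_cast; ring
      rw [hnm, e1, PySem.Int.mod_natCast]
      simp only [beq_iff_eq, decide_eq_true_eq]
      constructor
      · intro h
        have : m % (1 + k) = 0 := by exact_mod_cast h
        exact Nat.dvd_iff_mod_eq_zero.mpr this
      · intro h
        have : m % (1 + k) = 0 := Nat.dvd_iff_mod_eq_zero.mp h
        exact_mod_cast this
    rw [hcount, countP_divisors, Bool.eq_iff_iff, trial_iff n 2 (le_refl 2)]
    simp only [beq_iff_eq]
    constructor
    · intro h
      have hcard : m.divisors.card = 2 := by omega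
      have hp := (card_divisors_two m hm2).mp hcard
      intro e he2 hee hmod
      have he : e ∣ n := (PySem.Int.mod_eq_zero_iff_dvd n e).mp hmod
      have heq : e = ((e.toNat : Nat) : Int) := by omega
      have hq : e.toNat ∣ m := by
        rw [hnm, heq] at he
        exact_mod_cast he
      have hqq : e.toNat * e.toNat ≤ m := by
        rw [hnm, heq] at hee
        exact_mod_cast hee
      exact (Nat.prime_def_le_sqrt.mp hp).2 e.toNat (by omega) (Nat.le_sqrt.mpr hqq) hq
    · intro H
      have hp : m.Prime := by
        rw [Nat.prime_def_le_sqrt]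
        refine ⟨hm2, fun q hq2 hqs hqm => ?_⟩
        have hqq : q * q ≤ m := Nat.le_sqrt.mp hqs
        have hmod : PySem.Int.mod n (q : Int) = 0 :=
          (PySem.Int.mod_eq_zero_iff_dvd n (q : Int)).mpr (by rw [hnm]; exact_mod_cast hqm)
        exact H (q : Int) (by exact_mod_cast hq2) (by rw [hnm]; exact_mod_cast hqq) hmod
      have := (card_divisors_two m hm2).mpr hp
      omega
theorem pair_fold (l : List Int) (s : List Int) :
    l.foldl (fun (st : List Int × PySem.Set Int) numero =>
      let u := pvUltimos3 numero
      if pvEsPrimoAlt u && !(PySem.Set.contains st.2 u) then (st.1 ++ [u], PySem.Set.add st.2 u)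
      else st) (s, s)
    = (l.foldl (fun t c => if pvEsPrimoAlt (pvUltimos3 c) then PySem.Set.add t (pvUltimos3 c) else t) s,
       l.foldl (fun t c => if pvEsPrimoAlt (pvUltimos3 c) then PySem.Set.add t (pvUltimos3 c) else t) s) := by
  induction l generalizing s with
  | nil => rfl
  | cons x xs ih =>
    simp only [List.foldl_cons]
    by_cases hp : pvEsPrimoAlt (pvUltimos3 x) = true
    · by_cases hc : PySem.Set.contains s (pvUltimos3 x) = true
      · have hc' : pvUltimos3 x ∈ s := by simpa using hc
        have hadd : PySem.Set.add s (pvUltimos3 x) = s := by simp [PySem.Set.add, hc']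
        have hcond : (pvEsPrimoAlt (pvUltimos3 x) && !(PySem.Set.contains s (pvUltimos3 x))) = false := by
          rw [hp, hc]; rfl
        rw [hcond]
        simp only [Bool.false_eq_true, if_false]
        rw [if_pos hp, hadd]
        exact ih s
      · have hcf : PySem.Set.contains s (pvUltimos3 x) = false := by simpa using hc
        have hc' : pvUltimos3 x ∉ s := by simpa using hcf
        have hadd : PySem.Set.add s (pvUltimos3 x) = s ++ [pvUltimos3 x] := by
          simp [PySem.Set.add, hc']
        have hcond : (pvEsPrimoAlt (pvUltimos3 x) && !(PySem.Set.contains s (pvUltimos3 x))) = true := by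
          rw [hp, hcf]; rfl
        rw [hcond]
        simp only [if_true]
        rw [if_pos hp, hadd]
        exact ih (s ++ [pvUltimos3 x])
    · have hpf : pvEsPrimoAlt (pvUltimos3 x) = false := by simpa using hp
      have hcond : (pvEsPrimoAlt (pvUltimos3 x) && !(PySem.Set.contains s (pvUltimos3 x))) = false := by
        rw [hpf]; rfl
      rw [hcond]
      simp only [Bool.false_eq_true, if_false]
      rw [if_neg hp]
      exact ih s

theorem filtrar_eq (l : List Int) : filtrar_codigos_primos l = filtrar_codigos_primos_alt l := by
  unfold filtrar_codigos_primos filtrar_codigos_primos_alt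
  simp only [PySem.Set.empty]
  rw [pair_fold l []]
  rw [PySem.List.foldl_append_if (fun numero => pvEsPrimo (pvDevolver numero)) pvDevolver,
      List.nil_append]
  have hstep : (fun (lista : List Int) p => if lista.contains p then lista else lista ++ [p])
      = fun (s : PySem.Set Int) x => PySem.Set.add s x := by
    funext s x
    simp [PySem.Set.add, PySem.Set.contains]
  rw [hstep, List.foldl_map, ← PySem.List.foldl_if_eq_foldl_filter]
  simp only [dev_eq, primo_eq]

-- ===== VERDICT (by name: the statement is the Claim_ definition above) =====
theorem filtrar_codigos_primos_spec : Claim_equal_filtrar_codigos_primos := by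
  intro codigos_barra _
  unfold Spec_filtrar_codigos_primos
  exact filtrar_eq codigos_barra
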